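-- pv_equiv track=rewrite | github.com/yschan8137/mortgate_schedlue | Amort/test/applied_interval.py | applied_interval
-- ===== SOURCE A (Python) =====
-- import itertools
--
-- def applied_interval(arr):
--     interest= []
--     t= [0]
--     processed_t = []
--     for (v, q) in itertools.groupby(arr):
--         interest.append(v)
--         t.append(len([*q]))
--
--     def accumulative_summation(list):
--       """
--       Calculates the accumulative summation of a list.
--
--       Args:
--         list: A list of numbers.
--
--       Returns:
--         A list of numbers, where each number is the sum of the previous numbers in the list.
--       """
--       cumsum = []
--       for i in range(len(list)):
--         if i == 0:
--           cumsum.append(list[i])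
--         else:
--           cumsum.append(cumsum[i - 1] + list[i])
--       return cumsum
--
--     def group_by_consecutive_elements(list):
--      """
--      Groups the results of each consecutive elements in a list.
--
--      Args:
--        list: A list of numbers.
--
--      Returns:
--        A list of lists, where each inner list contains the consecutive elements of the original list.
--      """
--      groups = []
--      for (i, t) in zip(interest, range(len(list) - 1)):
--        groups.append((i, [list[t], list[t + 1]]))
--      return groups
--     return group_by_consecutive_elements(accumulative_summation(t))
-- ===== SOURCE B (Python) =====
-- def applied_interval(arr):
--     res = []
--     start = 0
--     i = 0
--     while i < len(arr):
--         j = i + 1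
--         while j < len(arr) and arr[j] == arr[i]:
--             j += 1
--         res.append((arr[i], [start, start + (j - i)]))
--         start += j - i
--         i = j
--     return res
-- ===== Notes on version B (the rewrite author's own statement) =====
-- stated objective: simpler
-- what changed: Replaces groupby + separate cumulative-summation list + zip-over-range indexing with a single two-pointer scan that emits each run's (value, [start, start+len]) inline while carrying a running start accumulator.
import Mathlib
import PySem

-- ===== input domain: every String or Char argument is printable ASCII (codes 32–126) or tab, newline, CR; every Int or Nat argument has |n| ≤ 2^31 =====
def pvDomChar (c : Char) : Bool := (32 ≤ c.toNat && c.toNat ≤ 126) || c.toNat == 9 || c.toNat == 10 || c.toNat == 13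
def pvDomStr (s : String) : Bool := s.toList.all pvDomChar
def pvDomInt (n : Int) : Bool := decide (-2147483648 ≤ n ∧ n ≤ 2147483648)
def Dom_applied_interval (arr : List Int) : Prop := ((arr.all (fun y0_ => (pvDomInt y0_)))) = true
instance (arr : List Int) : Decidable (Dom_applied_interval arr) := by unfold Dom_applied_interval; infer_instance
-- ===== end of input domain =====

-- B replaces A's groupby + cumulative-sum list + zip-over-range indexing by a single
-- two-pointer scan carrying a running start accumulator (objective: simpler).

-- ===== PORT A =====
-- itertools.groupby(arr) rendered as run-length encoding, left to right
def pyRunsAux (v : Int) (c : Int) : List Int → List (Int × Int)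
  | [] => [(v, c)]
  | x :: xs => if x = v then pyRunsAux v (c + 1) xs else (v, c) :: pyRunsAux x 1 xs

def pyRuns : List Int → List (Int × Int)
  | [] => []
  | x :: xs => pyRunsAux x 1 xs

-- accumulative_summation: cumsum[i] = cumsum[i-1] + list[i]; `prev` is cumsum[i-1]
def pyCumsumAux (prev : Int) : List Int → List Int
  | [] => []
  | x :: xs => (prev + x) :: pyCumsumAux (prev + x) xs

def pyCumsum : List Int → List Int
  | [] => []
  | x :: xs => x :: pyCumsumAux x xs

def applied_interval (arr : List Int) : List (Int × List Int) :=
  let rg := pyRuns arr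
  let interest := rg.map (·.1)
  let t : List Int := 0 :: rg.map (·.2)
  let cs := pyCumsum t
  -- group_by_consecutive_elements: zip(interest, range(len(cs) - 1)); cs[t], cs[t+1]
  -- (indices are provably in range, so getD is exact here)
  (interest.zip (List.range (cs.length - 1))).map
    (fun p => (p.1, [cs.getD p.2 0, cs.getD (p.2 + 1) 0]))

-- ===== PORT B =====
-- inner while loop: length of the prefix of xs equal to v (j - i - 1)
def altRun (v : Int) : List Int → Nat
  | [] => 0
  | x :: xs => if x = v then altRun v xs + 1 else 0

-- outer while loop over i, with `start` the running accumulator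
def altLoop (start : Int) : List Int → List (Int × List Int)
  | [] => []
  | x :: xs =>
    let k := altRun x xs
    (x, [start, start + ((k : Int) + 1)]) :: altLoop (start + ((k : Int) + 1)) (xs.drop k)
termination_by l => l.length
decreasing_by simp only [List.length_drop, List.length_cons]; omega

def applied_interval_alt (arr : List Int) : List (Int × List Int) :=
  altLoop 0 arr

-- ===== PRECONDITION & SPEC =====
def Spec_applied_interval (arr : List Int) (out : List (Int × List Int)) : Prop := out = applied_interval_alt arr
instance (arr : List Int) (out : List (Int × List Int)) : Decidable (Spec_applied_interval arr out) := by unfold Spec_applied_interval; infer_instance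

-- ===== CLAIM (what is proved, stated in full; the proofs are below) =====
def Claim_equal_applied_interval : Prop := ∀ (arr : List Int), Dom_applied_interval arr → Spec_applied_interval arr (applied_interval arr)

-- ===== LEMMAS AND PROOFS =====

-- common reference shape: one interval per run with a running start
def build (start : Int) : List (Int × Int) → List (Int × List Int)
  | [] => []
  | (v, n) :: rs => (v, [start, start + n]) :: build (start + n) rs

-- A's zip/cumsum pipeline, as a function of the run list and a generic start
theorem pipeline_eq_build (rs : List (Int × Int)) (start : Int) :
    ((rs.map (·.1)).zip (List.range rs.length)).map
      (fun p => (p.1, [(start :: pyCumsumAux start (rs.map (·.2))).getD p.2 0,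
                       (start :: pyCumsumAux start (rs.map (·.2))).getD (p.2 + 1) 0]))
    = build start rs := by
  induction rs generalizing start with
  | nil => simp [build]
  | cons hd tl ih =>
    obtain ⟨v, n⟩ := hd
    simp only [List.map_cons, List.length_cons, List.range_succ_eq_map,
      List.zip_cons_cons, List.map_cons, build, pyCumsumAux]
    rw [List.zip_map_right, List.map_map]
    rw [← ih (start + n)]
    rfl

theorem applied_interval_eq_build (arr : List Int) :
    applied_interval arr = build 0 (pyRuns arr) := by
  unfold applied_interval
  have h : pyCumsum (0 :: (pyRuns arr).map (·.2)) = 0 :: pyCumsumAux 0 ((pyRuns arr).map (·.2)) := by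
    simp [pyCumsum]
  simp only [h]
  have hlen : (0 :: pyCumsumAux 0 ((pyRuns arr).map (·.2))).length - 1 = (pyRuns arr).length := by
    have : ∀ (p : Int) (l : List Int), (pyCumsumAux p l).length = l.length := by
      intro p l; induction l generalizing p with
      | nil => simp [pyCumsumAux]
      | cons x xs ih => simp [pyCumsumAux, ih]
    simp [this]
  rw [hlen]
  exact pipeline_eq_build (pyRuns arr) 0

-- decomposition of groupby's first run in terms of B's inner-loop count
theorem pyRunsAux_decomp (v : Int) (c : Int) (xs : List Int) :
    pyRunsAux v c xs = (v, c + (altRun v xs : Int)) :: pyRuns (xs.drop (altRun v xs)) := by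
  induction xs generalizing c with
  | nil => simp [pyRunsAux, pyRuns, altRun]
  | cons x xs ih =>
    by_cases hx : x = v
    · subst hx
      simp only [pyRunsAux, altRun]
      rw [ih (c + 1)]
      have h1 : c + 1 + (altRun x xs : Int) = c + ((altRun x xs : Int) + 1) := by ring
      have h2 : List.drop (altRun x xs) xs = List.drop (altRun x xs + 1) (x :: xs) := by
        simp [List.drop_succ_cons]
      rw [h1, h2]
      norm_cast
    · simp [pyRunsAux, altRun, hx, pyRuns]

theorem altLoop_eq_build (l : List Int) (start : Int) :
    altLoop start l = build start (pyRuns l) := by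
  induction hn : l.length using Nat.strong_induction_on generalizing l start with
  | _ n ih =>
    match l with
    | [] => rw [altLoop.eq_def]; simp [pyRuns, build]
    | x :: xs =>
      subst hn
      rw [altLoop.eq_def]
      simp only
      rw [pyRuns, pyRunsAux_decomp x 1 xs, build]
      have hlt : (xs.drop (altRun x xs)).length < (x :: xs).length := by
        simp only [List.length_drop, List.length_cons]; omega
      rw [ih _ hlt _ _ rfl]
      have : (1 : Int) + (altRun x xs : Int) = (altRun x xs : Int) + 1 := by ring
      rw [this]

-- ===== VERDICT (by name: the statement is the Claim_ definition above) =====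
theorem applied_interval_spec : Claim_equal_applied_interval := by
  intro arr _
  unfold Spec_applied_interval applied_interval_alt
  rw [applied_interval_eq_build, altLoop_eq_build]
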